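-- pv_equiv track=rewrite | github.com/eadomenech/benchmark | watermarking/static/watermarking/methods_examples/my_extract.py | get_indice
-- ===== SOURCE A (Python) =====
-- def zigzag(n):
--     indexorder = sorted(
--         ((x, y) for x in range(n) for y in range(n)), key=lambda s: (s[0]+s[1], -s[1] if (s[0]+s[1]) % 2 else s[1]))
--     return {index: n for n, index in enumerate(indexorder)}
--
-- def get_indice(m):
--     zarray = zigzag(8)
--     indice = []
--     n = int(len(zarray) ** 0.5 + 0.5)
--     for x in range(n):
--         for y in range(n):
--                 if zarray[(x, y)] == m:
--                     indice.append(x)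
--                     indice.append(y)
--     return indice
-- ===== SOURCE B (Python) =====
-- def get_indice(m):
--     # Walk the classic 8x8 zigzag snake (anti-diagonals; even sum -> y ascending,
--     # odd sum -> y descending) with a running counter; return at the first hit.
--     n = 8
--     c = 0
--     for s in range(2 * n - 1):
--         ys = range(max(0, s - n + 1), min(s, n - 1) + 1)
--         if s % 2:
--             ys = reversed(ys)
--         for y in ys:
--             if c == m:
--                 return [s - y, y]
--             c += 1
--     return []
-- ===== Notes on version B (the rewrite author's own statement) =====
-- stated objective: simpler
-- what changed: Replaces A's build-a-64-entry-dict-by-sorting-all-cells-then-scan-every-cell approach with a direct anti-diagonal snake walk that keeps a running counter and returns at the first cell whose zigzag index equals m.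
import Mathlib
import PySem

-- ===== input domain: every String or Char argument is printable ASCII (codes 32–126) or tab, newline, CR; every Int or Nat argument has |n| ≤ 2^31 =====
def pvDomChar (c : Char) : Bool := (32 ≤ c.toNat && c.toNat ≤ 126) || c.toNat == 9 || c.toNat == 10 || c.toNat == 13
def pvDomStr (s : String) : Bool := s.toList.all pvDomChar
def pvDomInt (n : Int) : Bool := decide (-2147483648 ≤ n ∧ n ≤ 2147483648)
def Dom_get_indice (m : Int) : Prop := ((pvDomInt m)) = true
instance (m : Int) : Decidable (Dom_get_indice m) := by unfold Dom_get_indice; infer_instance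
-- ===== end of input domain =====

set_option maxRecDepth 100000

-- B replaces A's sort-the-64-cells-then-scan-all-cells construction by a direct anti-diagonal
-- snake walk with a running counter and an early return (objective: simpler).

-- ===== PORT A =====
-- zigzag(n): sort key is the tuple (x+y, -y if (x+y)%2 else y); Lean's PySem.sorted needs a
-- linearly ordered key, so the tuple is encoded as (x+y)*16 + (±y) — exact, since the second
-- component lies in [-7,7] ⊂ (-16,16), this encoding is order-isomorphic to Python's tuple order.
def zigzagA (n : Int) : PySem.Dict (Int × Int) Int :=
  let indexorder := PySem.List.sorted
    ((PySem.List.pyRange 0 n 1).flatMap (fun x => (PySem.List.pyRange 0 n 1).map (fun y => (x, y))))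
    (fun s => (s.1 + s.2) * 16 + (if PySem.Int.mod (s.1 + s.2) 2 ≠ 0 then -s.2 else s.2)) false
  (PySem.List.enumerate indexorder 0).foldl (fun d p => d.insert p.2 p.1) PySem.Dict.empty

-- hand port of int(len ** 0.5 + 0.5) (round-half-up of the square root, a float expression):
-- r*r ≤ k+r  iff  r ≤ sqrt(k)+1/2, so this is exact for every Nat k (here k = 64)
def pySqrtRound (k : Nat) : Nat := ((List.range (k + 1)).filter (fun r => r * r ≤ k + r)).length - 1

-- zarray[(x, y)] always succeeds (every (x,y) of the ranges is a key), so the KeyError-free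
-- lookup is ported as get? + getD 0
def get_indice (m : Int) : List Int :=
  let zarray := zigzagA 8
  let n : Int := Int.ofNat (pySqrtRound zarray.size)
  (PySem.List.pyRange 0 n 1).foldl (fun acc x =>
    (PySem.List.pyRange 0 n 1).foldl (fun acc y =>
      if (zarray.get? (x, y)).getD 0 = m then acc ++ [x] ++ [y] else acc) acc) []

-- ===== PORT B =====
def diagYs (n s : Int) : List Int :=
  let ys := PySem.List.pyRange (max 0 (s - n + 1)) (min s (n - 1) + 1) 1
  if PySem.Int.mod s 2 ≠ 0 then ys.reverse else ys

-- Source B's early 'return [s - y, y]' is ported as a fold whose state freezes once the result is found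
def altStep (m s : Int) (st : Option (List Int) × Int) (y : Int) : Option (List Int) × Int :=
  match st.1 with
  | some r => (some r, st.2)
  | none => if st.2 = m then (some [s - y, y], st.2) else (none, st.2 + 1)

def get_indice_alt (m : Int) : List Int :=
  let n : Int := 8
  let res := (PySem.List.pyRange 0 (2 * n - 1) 1).foldl
    (fun st s => (diagYs n s).foldl (altStep m s) st) ((none : Option (List Int)), (0 : Int))
  res.1.getD []

-- ===== PRECONDITION & SPEC =====
def Spec_get_indice (m : Int) (out : List Int) : Prop := out = get_indice_alt m
instance (m : Int) (out : List Int) : Decidable (Spec_get_indice m out) := by unfold Spec_get_indice; infer_instance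

-- ===== CLAIM (what is proved, stated in full; the proofs are below) =====
def Claim_equal_get_indice : Prop := ∀ (m : Int), Dom_get_indice m → Spec_get_indice m (get_indice m)

-- ===== LEMMAS AND PROOFS =====

-- the 64 in-range values, by kernel evaluation of both ports
theorem in_range_eq : ∀ k : Fin 64, get_indice (k : Int) = get_indice_alt (k : Int) := by decide

-- every value stored in zigzagA 8 (and the getD default 0) lies in [0, 64)
theorem zig_vals_lt :
    ∀ x ∈ PySem.List.pyRange 0 8 1, ∀ y ∈ PySem.List.pyRange 0 8 1,
      0 ≤ ((zigzagA 8).get? (x, y)).getD 0 ∧ ((zigzagA 8).get? (x, y)).getD 0 < 64 := by decide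

theorem foldl_fixed_of {α β : Type} (f : β → α → β) (l : List α)
    (h : ∀ a ∈ l, ∀ c : β, f c a = c) : ∀ b : β, l.foldl f b = b := by
  induction l with
  | nil => intro b; rfl
  | cons a t ih =>
    intro b
    rw [List.foldl_cons, h a (List.mem_cons_self), ih (fun a ha c => h a (List.mem_cons_of_mem _ ha) c)]

theorem A_out (m : Int) (hm : m < 0 ∨ 64 ≤ m) : get_indice m = [] := by
  have hn : Int.ofNat (pySqrtRound (zigzagA 8).size) = 8 := by decide
  simp only [get_indice, hn]
  apply foldl_fixed_of
  intro x hx c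
  apply foldl_fixed_of
  intro y hy c'
  rw [if_neg]
  have h := zig_vals_lt x hx y hy
  omega

theorem altStep_none (m s : Int) (l : List Int) :
    ∀ c : Int, (∀ k : Nat, (k : Int) < l.length → c + k ≠ m) →
      l.foldl (altStep m s) (none, c) = (none, c + l.length) := by
  induction l with
  | nil => intro c _; simp
  | cons y t ih =>
    intro c h
    have hc : c ≠ m := by simpa using h 0 (by simp)
    rw [List.foldl_cons, show altStep m s (none, c) y = (none, c + 1) from by simp [altStep, hc],
      ih (c + 1) (fun k hk => by
        have := h (k + 1) (by simp only [List.length_cons] at hk ⊢; push_cast at hk ⊢; omega)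
        push_cast at this ⊢; omega)]
    simp; ring

theorem altOuter_none (m : Int) (l : List Int) :
    ∀ c : Int, (∀ k : Nat, (k : Int) < ((l.map (fun s => ((diagYs 8 s).length : Int))).sum) → c + k ≠ m) →
      l.foldl (fun st s => (diagYs 8 s).foldl (altStep m s) st) (none, c)
        = (none, c + (l.map (fun s => ((diagYs 8 s).length : Int))).sum) := by
  induction l with
  | nil => intro c _; simp
  | cons s t ih =>
    intro c h
    have hlen : (0:Int) ≤ ((t.map (fun s => ((diagYs 8 s).length : Int))).sum) := by
      apply List.sum_nonneg; intro x hx; simp at hx; obtain ⟨a, _, rfl⟩ := hx; positivity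
    have hsum : (((s :: t).map (fun s => ((diagYs 8 s).length : Int))).sum)
        = ((diagYs 8 s).length : Int) + ((t.map (fun s => ((diagYs 8 s).length : Int))).sum) := by simp
    rw [List.foldl_cons,
      altStep_none m s (diagYs 8 s) c (fun k hk => h k (by rw [hsum]; omega)),
      ih (c + (diagYs 8 s).length) (fun k hk => by
        have := h (k + (diagYs 8 s).length) (by rw [hsum]; push_cast at hk ⊢; omega)
        push_cast at this ⊢; omega)]
    rw [hsum]; ring_nf

theorem B_out (m : Int) (hm : m < 0 ∨ 64 ≤ m) : get_indice_alt m = [] := by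
  have hsum : (((PySem.List.pyRange 0 (2 * (8:Int) - 1) 1).map (fun s => ((diagYs 8 s).length : Int))).sum) = 64 := by decide
  simp only [get_indice_alt]
  rw [altOuter_none m _ 0 (fun k hk => by rw [hsum] at hk; omega)]
  rfl

-- ===== VERDICT (by name: the statement is the Claim_ definition above) =====
theorem get_indice_spec : Claim_equal_get_indice := by
  intro m _
  unfold Spec_get_indice
  by_cases hm : 0 ≤ m ∧ m < 64
  · have hk : m.toNat < 64 := by omega
    have h := in_range_eq ⟨m.toNat, hk⟩
    simpa [Int.toNat_of_nonneg hm.1] using h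
  · rw [A_out m (by omega), B_out m (by omega)]
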